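-- pv_equiv track=rewrite | github.com/sendakvmahr/c_sea | text/tokenizers/basic_tokenizer.py | punc_split
-- ===== SOURCE A (Python) =====
-- def punc_split(text, punctuation):
-- 	result = []
-- 	current = ""
-- 	text = text.lower()
-- 	for c in text:
-- 		if c in punctuation:
-- 			result.append(current)
-- 			result.append(c)
-- 			current = ""
-- 		else:
-- 			current += c
-- 	if current != "":
-- 		result.append(current)
-- 	return result
-- ===== SOURCE B (Python) =====
-- import re
--
--
-- def punc_split(text, punctuation):
--     text = text.lower()
--     if not punctuation:
--         return [text] if text else []
--     pattern = "([" + "".join(re.escape(c) for c in punctuation) + "])"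
--     parts = re.split(pattern, text)
--     if parts and parts[-1] == "":
--         parts.pop()
--     return parts
-- ===== Notes on version B (the rewrite author's own statement) =====
-- stated objective: idiomatic
-- what changed: Replaces the manual character-accumulator loop with a regex split on a capturing punctuation class (re.split), then drops the single trailing empty field that A never produces.
import Mathlib
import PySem

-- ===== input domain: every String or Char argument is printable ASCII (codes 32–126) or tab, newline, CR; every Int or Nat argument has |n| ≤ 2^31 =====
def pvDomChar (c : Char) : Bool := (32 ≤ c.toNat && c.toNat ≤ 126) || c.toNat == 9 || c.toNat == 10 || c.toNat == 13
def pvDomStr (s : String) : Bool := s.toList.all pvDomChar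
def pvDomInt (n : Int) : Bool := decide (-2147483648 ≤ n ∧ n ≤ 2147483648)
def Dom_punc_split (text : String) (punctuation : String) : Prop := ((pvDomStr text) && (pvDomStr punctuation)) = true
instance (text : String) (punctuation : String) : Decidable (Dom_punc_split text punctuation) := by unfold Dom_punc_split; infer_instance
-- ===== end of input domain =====

-- B replaces A's manual accumulator loop by a delimiter-keeping split (regex re.split in
-- Python) plus removal of the trailing empty field; same return values, idiomatic style.

-- ===== PORT A =====
-- A's loop: fold over the lowered text with state (result, current)
def punc_split (text : String) (punctuation : String) : List String :=
  let t := PySem.Str.lower text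
  let st := t.toList.foldl
    (fun (st : List String × List Char) c =>
      if punctuation.toList.contains c then
        (st.1 ++ [String.ofList st.2, String.ofList [c]], [])
      else
        (st.1, st.2 ++ [c]))
    ([], [])
  if String.ofList st.2 ≠ "" then st.1 ++ [String.ofList st.2] else st.1

-- ===== PORT B =====
-- port of re.split with a single capturing character class: the fields between
-- delimiter characters, with each delimiter kept as its own element
def splitKeep (p : Char → Bool) (cs : List Char) : List String :=
  match h : cs.dropWhile (fun c => !p c) with
  | [] => [String.ofList (cs.takeWhile (fun c => !p c))]
  | d :: rs =>
      String.ofList (cs.takeWhile (fun c => !p c)) :: String.ofList [d] :: splitKeep p rs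
termination_by cs.length
decreasing_by
  have hle : (cs.dropWhile (fun c => !p c)).length ≤ cs.length :=
    List.length_dropWhile_le _ _
  simp [h] at hle; omega

-- parts.pop() when the last field is empty
def dropTrailingEmpty (l : List String) : List String :=
  if l.getLast? = some "" then l.dropLast else l

def punc_split_alt (text : String) (punctuation : String) : List String :=
  let t := PySem.Str.lower text
  if punctuation.toList = [] then
    if t = "" then [] else [t]
  else
    dropTrailingEmpty (splitKeep (fun c => punctuation.toList.contains c) t.toList)

-- ===== PRECONDITION & SPEC =====
def Spec_punc_split (text : String) (punctuation : String) (out : List String) : Prop := out = punc_split_alt text punctuation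
instance (text : String) (punctuation : String) (out : List String) : Decidable (Spec_punc_split text punctuation out) := by unfold Spec_punc_split; infer_instance

-- ===== CLAIM (what is proved, stated in full; the proofs are below) =====
def Claim_equal_punc_split : Prop := ∀ (text : String) (punctuation : String), Dom_punc_split text punctuation → Spec_punc_split text punctuation (punc_split text punctuation)

-- ===== LEMMAS AND PROOFS =====

theorem splitKeep_ne_nil (p : Char → Bool) (cs : List Char) : splitKeep p cs ≠ [] := by
  rw [splitKeep.eq_def]
  split <;> simp

theorem getLast?_cons' {α : Type} (x : α) (l : List α) (h : l ≠ []) :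
    (x :: l).getLast? = l.getLast? := by
  cases l with
  | nil => simp at h
  | cons a l => simp [List.getLast?_cons_cons]

theorem dropLast_cons' {α : Type} (x : α) (l : List α) (h : l ≠ []) :
    (x :: l).dropLast = x :: l.dropLast := by
  cases l with
  | nil => simp at h
  | cons a l => simp

theorem dropTrailingEmpty_cons_cons (x y : String) (l : List String) (hl : l ≠ []) :
    dropTrailingEmpty (x :: y :: l) = x :: y :: dropTrailingEmpty l := by
  unfold dropTrailingEmpty
  rw [getLast?_cons' x (y :: l) (by simp), getLast?_cons' y l hl]
  split
  · rw [dropLast_cons' x (y :: l) (by simp), dropLast_cons' y l hl]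
  · rfl

theorem ofList_eq_empty_iff (cs : List Char) : String.ofList cs = "" ↔ cs = [] := by
  constructor
  · intro h; have := congrArg String.toList h; simpa using this
  · intro h; subst h; rfl

-- A's fold step, abstracted
def pvStep (p : Char → Bool) (st : List String × List Char) (c : Char) : List String × List Char :=
  if p c then (st.1 ++ [String.ofList st.2, String.ofList [c]], []) else (st.1, st.2 ++ [c])

-- A's finishing step
def pvFinish (st : List String × List Char) : List String :=
  if String.ofList st.2 ≠ "" then st.1 ++ [String.ofList st.2] else st.1

theorem pvFoldl_res (p : Char → Bool) (cs : List Char) (res : List String) (cur : List Char) :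
    cs.foldl (pvStep p) (res, cur) =
      (res ++ (cs.foldl (pvStep p) ([], cur)).1, (cs.foldl (pvStep p) ([], cur)).2) := by
  induction cs generalizing res cur with
  | nil => simp
  | cons c cs ih =>
      simp only [List.foldl_cons]
      by_cases hc : p c
      · rw [pvStep, pvStep, if_pos hc, if_pos hc]
        rw [ih (res ++ [String.ofList cur, String.ofList [c]]) [],
            ih ([] ++ [String.ofList cur, String.ofList [c]]) []]
        simp
      · rw [pvStep, pvStep, if_neg hc, if_neg hc]
        exact ih res (cur ++ [c])

theorem pvFinish_append (res r : List String) (cur : List Char) :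
    pvFinish (res ++ r, cur) = res ++ pvFinish (r, cur) := by
  unfold pvFinish
  split <;> simp

-- main invariant: starting with a punctuation-free partial chunk `cur`,
-- finishing A's fold equals B's trimmed split of `cur ++ cs`
theorem pvLoop_eq (p : Char → Bool) (cs cur : List Char) (hcur : ∀ c ∈ cur, p c = false) :
    pvFinish (cs.foldl (pvStep p) ([], cur)) = dropTrailingEmpty (splitKeep p (cur ++ cs)) := by
  induction cs generalizing cur with
  | nil =>
      have htake : (cur ++ ([] : List Char)).takeWhile (fun c => !p c) = cur := by
        simp only [List.append_nil, List.takeWhile_eq_self_iff]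
        intro c hc; simp [hcur c hc]
      have hdrop : (cur ++ ([] : List Char)).dropWhile (fun c => !p c) = [] := by
        simp only [List.append_nil, List.dropWhile_eq_nil_iff]
        intro c hc; simp [hcur c hc]
      rw [splitKeep.eq_def]
      split
      · next heq =>
          simp only [List.foldl_nil, pvFinish, dropTrailingEmpty, htake]
          by_cases h : String.ofList cur = ""
          · simp [h, (ofList_eq_empty_iff cur).mp h]
          · simp [h]
      · next d rs heq => rw [hdrop] at heq; exact absurd heq (by simp)
  | cons c cs ih =>
      simp only [List.foldl_cons]
      by_cases hc : p c
      · rw [pvStep, if_pos hc]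
        have hsplit : splitKeep p (cur ++ c :: cs) =
            String.ofList cur :: String.ofList [c] :: splitKeep p cs := by
          have htake : (cur ++ c :: cs).takeWhile (fun c => !p c) = cur := by
            rw [List.takeWhile_append]
            have h1 : cur.takeWhile (fun c => !p c) = cur := by
              simp only [List.takeWhile_eq_self_iff]
              intro x hx; simp [hcur x hx]
            simp [h1, List.takeWhile_cons, hc]
          have hdrop : (cur ++ c :: cs).dropWhile (fun c => !p c) = c :: cs := by
            rw [List.dropWhile_append]
            have h1 : cur.dropWhile (fun c => !p c) = [] := by
              simp only [List.dropWhile_eq_nil_iff]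
              intro x hx; simp [hcur x hx]
            simp [h1, List.dropWhile_cons, hc]
          rw [splitKeep.eq_def]
          split
          · next heq => rw [hdrop] at heq; exact absurd heq (by simp)
          · next d rs heq =>
              rw [hdrop] at heq
              have hd : c = d := (List.cons.injEq _ _ _ _ ▸ heq).1
              have hrs : cs = rs := (List.cons.injEq _ _ _ _ ▸ heq).2
              rw [htake, ← hd, ← hrs]
        rw [hsplit, dropTrailingEmpty_cons_cons _ _ _ (splitKeep_ne_nil p cs)]
        have hih := ih [] (by simp)
        simp only [List.nil_append] at hih
        rw [← hih]
        show pvFinish (List.foldl (pvStep p) ([String.ofList cur, String.ofList [c]], []) cs) = _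
        rw [pvFoldl_res p cs [String.ofList cur, String.ofList [c]] [], pvFinish_append]
        simp
      · rw [pvStep, if_neg hc]
        have hsplit : cur ++ c :: cs = (cur ++ [c]) ++ cs := by simp
        rw [hsplit, ← ih (cur ++ [c])]
        intro x hx
        rcases List.mem_append.mp hx with h | h
        · exact hcur x h
        · simp at h; subst h; simpa using hc

theorem splitKeep_of_false (p : Char → Bool) (hp : ∀ c, p c = false) (cs : List Char) :
    splitKeep p cs = [String.ofList cs] := by
  rw [splitKeep.eq_def]
  split
  · next heq =>
      have ht : cs.takeWhile (fun c => !p c) = cs :=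
        List.takeWhile_eq_self_iff.mpr (fun a _ => by simp [hp])
      rw [ht]
  · next d rs heq =>
      have h1 : cs.dropWhile (fun c => !p c) = [] := by
        simp [List.dropWhile_eq_nil_iff, hp]
      rw [h1] at heq; exact absurd heq (by simp)

theorem punc_split_eq (t q : String) :
    punc_split t q = pvFinish ((PySem.Str.lower t).toList.foldl
      (pvStep (fun c => q.toList.contains c)) ([], [])) := rfl

-- ===== VERDICT (by name: the statement is the Claim_ definition above) =====
theorem punc_split_spec : Claim_equal_punc_split := by
  intro text punctuation _
  unfold Spec_punc_split
  rw [punc_split_eq]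
  have hmain := pvLoop_eq (fun c => punctuation.toList.contains c)
    (PySem.Str.lower text).toList [] (by simp)
  simp only [List.nil_append] at hmain
  rw [hmain]
  unfold punc_split_alt
  by_cases hpe : punctuation.toList = []
  · -- empty punctuation: the predicate is constantly false, the split is one whole-text chunk
    rw [splitKeep_of_false _ (by intro c; simp [hpe]) _, String.ofList_toList]
    simp only [hpe, if_pos rfl]  -- punctuation is empty: take B's first branch
    unfold dropTrailingEmpty
    by_cases h : PySem.Str.lower text = "" <;> simp [h]
  · simp [hpe]
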